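-- pv_equiv track=rewrite | github.com/Dorothy011/pythonProject | stage2/util.py | ner_title
-- ===== SOURCE A (Python) =====
-- import string
--
-- def ner_title(sent):
--     punc_list = ['(', '（', '[', '【', '']
--     i = sent.find('(')
--     if i > 0:
--         sent = sent[:i]
--     for punc in string.punctuation:
--         sent = sent.replace(punc, ' ')
--     ent = sent.split()
--     return [e for e in ent if len(e) >= 2]
-- ===== SOURCE B (Python) =====
-- import string
--
-- def ner_title(sent):
--     i = sent.find('(')
--     if i > 0:
--         sent = sent[:i]
--     tokens = []
--     buf = ""
--     for ch in sent:
--         if ch.isspace() or ch in string.punctuation: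
--             if len(buf) >= 2:
--                 tokens.append(buf)
--             buf = ""
--         else:
--             buf += ch
--     if len(buf) >= 2:
--         tokens.append(buf)
--     return tokens
-- ===== Notes on version B (the rewrite author's own statement) =====
-- stated objective: alternative
-- what changed: B replaces A's clean-then-split pipeline (32 whole-string replace passes turning punctuation into spaces, then split(), then a length filter) by a single left-to-right scan that tokenizes directly with a buffer, flushing at whitespace-or-punctuation delimiters and keeping only tokens of length >= 2.
import Mathlib
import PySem

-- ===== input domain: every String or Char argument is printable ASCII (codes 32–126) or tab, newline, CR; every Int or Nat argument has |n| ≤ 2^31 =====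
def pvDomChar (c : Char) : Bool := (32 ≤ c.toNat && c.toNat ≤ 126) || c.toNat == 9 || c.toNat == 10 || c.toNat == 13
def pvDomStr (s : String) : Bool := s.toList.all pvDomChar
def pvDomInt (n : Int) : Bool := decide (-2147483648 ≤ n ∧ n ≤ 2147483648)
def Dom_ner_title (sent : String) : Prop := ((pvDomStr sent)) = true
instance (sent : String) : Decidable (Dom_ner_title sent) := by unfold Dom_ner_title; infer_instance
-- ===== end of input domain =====

-- B replaces A's clean-then-split (32 replace passes, then split, then filter) by one
-- left-to-right tokenizing scan with a buffer; same return value, objective: alternative.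

-- ===== PORT A =====
-- string.punctuation, as a list of chars (A's loop iterates over its characters).
def pvPunct : List Char := "!\"#$%&'()*+,-./:;<=>?@[\\]^_`{|}~".toList

-- A's punc_list variable is dead code (never read) and is not ported.
def ner_title (sent : String) : List String :=
  let i := PySem.Str.find sent "("
  let sent1 := if 0 < i then PySem.Str.slice sent none (some i) else sent
  let sent2 := pvPunct.foldl (fun s p => PySem.Str.replace s (String.ofList [p]) " ") sent1
  let ent := PySem.Str.split₀ sent2
  ent.filter (fun e => decide (2 ≤ PySem.Str.len e))

-- ===== PORT B =====
def pvIsDelim (c : Char) : Bool := PySem.Chars.isspace c || pvPunct.contains c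

-- B's for-loop: flush the buffer at a delimiter (keep it if len ≥ 2), else extend it.
def pvTokGo : List Char → List Char → List (List Char) → List (List Char)
  | [], buf, acc => if 2 ≤ buf.length then acc ++ [buf] else acc
  | c :: rest, buf, acc =>
    if pvIsDelim c then
      if 2 ≤ buf.length then pvTokGo rest [] (acc ++ [buf]) else pvTokGo rest [] acc
    else pvTokGo rest (buf ++ [c]) acc

def ner_title_alt (sent : String) : List String :=
  let i := PySem.Str.find sent "("
  let sent1 := if 0 < i then PySem.Str.slice sent none (some i) else sent
  (pvTokGo sent1.toList [] []).map String.ofList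

-- ===== PRECONDITION & SPEC =====
def Spec_ner_title (sent : String) (out : List String) : Prop := out = ner_title_alt sent
instance (sent : String) (out : List String) : Decidable (Spec_ner_title sent out) := by unfold Spec_ner_title; infer_instance

-- ===== CLAIM (what is proved, stated in full; the proofs are below) =====
def Claim_equal_ner_title : Prop := ∀ (sent : String), Dom_ner_title sent → Spec_ner_title sent (ner_title sent)

-- ===== LEMMAS AND PROOFS =====

-- the character-level cleaning A's replace-fold performs
def pvClean (c : Char) : Char := if c ∈ pvPunct then ' ' else c

lemma pv_replace_go_singleton (a b : Char) :
    ∀ (l : List Char) (fuel : Nat) (acc : List Char), l.length ≤ fuel →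
      PySem.Chars.replace.go [a] [b] fuel l acc =
        acc.reverse ++ l.map (fun c => if c = a then b else c) := by
  intro l
  induction l with
  | nil =>
    intro fuel acc _
    cases fuel <;> simp [PySem.Chars.replace.go]
  | cons c t ih =>
    intro fuel acc h
    cases fuel with
    | zero => simp at h
    | succ f =>
      have hf : t.length ≤ f := Nat.le_of_succ_le_succ (by simpa using h)
      by_cases hc : c = a
      · subst hc
        simp [PySem.Chars.replace.go, List.isPrefixOf, ih f (b :: acc) hf]
      · simp [PySem.Chars.replace.go, List.isPrefixOf, Ne.symm hc, hc,
          ih f (c :: acc) hf]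

lemma pv_replace_singleton (a b : Char) (s : List Char) :
    PySem.Chars.replace s [a] [b] = s.map (fun c => if c = a then b else c) := by
  simpa [PySem.Chars.replace] using pv_replace_go_singleton a b s s.length [] le_rfl

lemma pv_foldl_replace (L : List Char) (hL : ' ' ∉ L) :
    ∀ (t : List Char),
      L.foldl (fun t p => PySem.Chars.replace t [p] [' ']) t =
        t.map (fun c => if c ∈ L then ' ' else c) := by
  induction L with
  | nil => intro t; simp
  | cons p L' ih =>
    intro t
    have hsp : ' ' ∉ L' := fun h => hL (List.mem_cons_of_mem _ h)
    have hpne : p ≠ ' ' := fun h => hL (h ▸ List.mem_cons_self)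
    rw [List.foldl_cons, pv_replace_singleton, ih hsp, List.map_map]
    refine List.map_congr_left ?_
    intro c _
    by_cases hc : c = p
    · subst hc; simp [hsp]
    · simp [hc, Function.comp]

lemma pv_toList_foldl_replace (L : List Char) :
    ∀ (s : String),
      (L.foldl (fun s p => PySem.Str.replace s (String.ofList [p]) " ") s).toList =
        L.foldl (fun t p => PySem.Chars.replace t [p] [' ']) s.toList := by
  induction L with
  | nil => intro s; simp
  | cons p L' ih =>
    intro s
    rw [List.foldl_cons, List.foldl_cons, ih]
    congr 1
    simp [PySem.Str.toList_replace]

-- split₀.go without its accumulators (proof helper for A's side)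
def pvWords : List Char → List Char → List (List Char)
  | [], cur => if cur.isEmpty then [] else [cur.reverse]
  | c :: rest, cur =>
    if PySem.Chars.isspace c then
      if cur.isEmpty then pvWords rest [] else cur.reverse :: pvWords rest []
    else pvWords rest (c :: cur)

lemma pv_split_go (s : List Char) :
    ∀ (cur : List Char) (acc : List (List Char)),
      PySem.Chars.split₀.go s cur acc = acc.reverse ++ pvWords s cur := by
  induction s with
  | nil =>
    intro cur acc
    by_cases h : cur.isEmpty <;> simp [PySem.Chars.split₀.go, pvWords, h]
  | cons c rest ih =>
    intro cur acc
    by_cases hs : PySem.Chars.isspace c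
    · by_cases h : cur.isEmpty <;>
        simp [PySem.Chars.split₀.go, pvWords, hs, h, ih]
    · simp [PySem.Chars.split₀.go, pvWords, hs, ih]

lemma pv_tokGo_append (s : List Char) :
    ∀ (buf : List Char) (acc : List (List Char)),
      pvTokGo s buf acc = acc ++ pvTokGo s buf [] := by
  induction s with
  | nil =>
    intro buf acc
    by_cases h : 2 ≤ buf.length <;> simp [pvTokGo, h]
  | cons c rest ih =>
    intro buf acc
    by_cases hd : pvIsDelim c
    · by_cases h : 2 ≤ buf.length
      · simp only [pvTokGo, hd, if_pos h, if_true, List.nil_append]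
        rw [ih [] (acc ++ [buf]), ih [] [buf]]
        simp
      · simp only [pvTokGo, hd, if_neg h, if_true]
        exact ih [] acc
    · simp only [pvTokGo, hd, Bool.false_eq_true, if_false]
      exact ih (buf ++ [c]) acc

lemma pv_isspace_clean (c : Char) :
    PySem.Chars.isspace (pvClean c) = pvIsDelim c := by
  by_cases h : c ∈ pvPunct
  · have h2 : pvIsDelim c = true := by simp [pvIsDelim, h]
    rw [pvClean, if_pos h, h2]
    decide
  · have h2 : pvPunct.contains c = false := by simpa using h
    rw [pvClean, if_neg h, pvIsDelim, h2]
    simp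

lemma pv_main (s : List Char) :
    ∀ (buf : List Char),
      pvTokGo s buf [] =
        (pvWords (s.map pvClean) buf.reverse).filter (fun t => decide (2 ≤ t.length)) := by
  induction s with
  | nil =>
    intro buf
    by_cases h : 2 ≤ buf.length
    · have hne : buf.reverse.isEmpty = false := by
        rcases buf with _ | _ <;> simp_all
      simp [pvTokGo, pvWords, h, hne]
    · by_cases hb : buf = []
      · subst hb; simp [pvTokGo, pvWords]
      · have hne : buf.reverse.isEmpty = false := by simp [hb]
        simp [pvTokGo, pvWords, h, hne]
  | cons c rest ih =>
    intro buf
    by_cases hd : pvIsDelim c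
    · have hsp : PySem.Chars.isspace (pvClean c) = true := by
        rw [pv_isspace_clean]; exact hd
      by_cases h : 2 ≤ buf.length
      · have hne : buf.reverse.isEmpty = false := by
          rcases buf with _ | _ <;> simp_all
        simp only [pvTokGo, hd, h, if_pos]
        rw [pv_tokGo_append, ih []]
        simp [pvWords, hsp, hne, h]
      · by_cases hb : buf = []
        · subst hb
          simp only [pvTokGo, hd, if_true, if_neg h]
          rw [ih []]
          simp [pvWords, hsp]
        · have hne : buf.reverse.isEmpty = false := by simp [hb]
          simp only [pvTokGo, hd, if_true, if_neg h]
          rw [ih []]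
          simp [pvWords, hsp, hne, h]
    · have hcp : c ∉ pvPunct := by
        intro hc
        exact hd (by simp [pvIsDelim, hc])
      have hcl : pvClean c = c := by simp [pvClean, hcp]
      have hsp : PySem.Chars.isspace c = false := by
        cases hh : PySem.Chars.isspace c
        · rfl
        · exact absurd (by simp [pvIsDelim, hh]) hd
      simp only [pvTokGo, hd, Bool.false_eq_true, if_false]
      rw [ih (buf ++ [c])]
      simp [pvWords, hcl, hsp]

lemma pv_space_not_punct : ' ' ∉ pvPunct := by decide

-- ===== VERDICT (by name: the statement is the Claim_ definition above) =====
theorem ner_title_spec : Claim_equal_ner_title := by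
  intro sent _
  unfold Spec_ner_title ner_title ner_title_alt
  dsimp only
  generalize (if 0 < PySem.Str.find sent "(" then PySem.Str.slice sent none (some (PySem.Str.find sent "(")) else sent) = sent1
  rw [pv_main sent1.toList []]
  have h2 : (pvPunct.foldl (fun s p => PySem.Str.replace s (String.ofList [p]) " ") sent1).toList
      = sent1.toList.map pvClean := by
    rw [pv_toList_foldl_replace, pv_foldl_replace pvPunct pv_space_not_punct]
    rfl
  rw [PySem.Str.split₀, PySem.Chars.split₀, h2, pv_split_go, List.filter_map]
  simp only [List.reverse_nil, List.nil_append]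
  refine congrArg (List.map String.ofList) ?_
  refine (List.filter_congr ?_).symm
  intro t _
  simp [Function.comp, PySem.Str.len]
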